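-- pv_equiv track=rewrite | github.com/ooweatah/Algorithm | 프로그래머스/lv0/120830. 양꼬치/양꼬치.py | solution
-- ===== SOURCE A (Python) =====
-- def solution(n, k):
--     answer = 0
--     discount = 0
--     a=0
--     b=0
--     for i in range(1,n+1):
--         a += 1
--         if i%10==0:
--             discount += 1
--     for j in range(1,k+1):
--         b +=1
--     answer = a*12000 + b*2000 - discount*2000
--
--     return answer
-- ===== SOURCE B (Python) =====
-- def solution(n, k):
--     n = max(n, 0)
--     k = max(k, 0)
--     return n * 12000 + k * 2000 - n // 10 * 2000
-- ===== Notes on version B (the rewrite author's own statement) =====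
-- stated objective: faster
-- what changed: Replaces the two counting loops over range(1,n+1) and range(1,k+1) by the closed form n*12000 + k*2000 - n//10*2000 (counts clamped at 0 for empty ranges).
import Mathlib
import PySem

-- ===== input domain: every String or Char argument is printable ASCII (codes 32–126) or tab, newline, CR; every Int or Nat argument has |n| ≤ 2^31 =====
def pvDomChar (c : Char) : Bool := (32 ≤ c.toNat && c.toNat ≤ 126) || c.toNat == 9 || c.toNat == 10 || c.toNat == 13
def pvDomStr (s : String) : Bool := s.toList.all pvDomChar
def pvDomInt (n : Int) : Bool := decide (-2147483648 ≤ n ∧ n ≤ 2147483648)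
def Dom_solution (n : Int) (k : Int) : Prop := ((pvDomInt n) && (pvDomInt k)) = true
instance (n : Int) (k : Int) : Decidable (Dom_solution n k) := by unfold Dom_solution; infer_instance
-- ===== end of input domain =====

-- ===== PORT A =====
-- One honest line: B replaces A's two counting loops by a closed formula (O(1) instead of O(n+k)).
def solution (n : Int) (k : Int) : Int :=
  let s := (PySem.List.pyRange 1 (n + 1) 1).foldl
    (fun (st : Int × Int) i => (st.1 + 1, if PySem.Int.mod i 10 = 0 then st.2 + 1 else st.2))
    (0, 0)
  let b := (PySem.List.pyRange 1 (k + 1) 1).foldl (fun (b : Int) _ => b + 1) 0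
  s.1 * 12000 + b * 2000 - s.2 * 2000

-- ===== PORT B =====
def solution_alt (n : Int) (k : Int) : Int :=
  let n' := max n 0
  let k' := max k 0
  n' * 12000 + k' * 2000 - PySem.Int.floordiv n' 10 * 2000

-- ===== PRECONDITION & SPEC =====
def Spec_solution (n : Int) (k : Int) (out : Int) : Prop := out = solution_alt n k
instance (n : Int) (k : Int) (out : Int) : Decidable (Spec_solution n k out) := by unfold Spec_solution; infer_instance

-- ===== CLAIM (what is proved, stated in full; the proofs are below) =====
def Claim_equal_solution : Prop := ∀ (n : Int) (k : Int), Dom_solution n k → Spec_solution n k (solution n k)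

-- ===== LEMMAS AND PROOFS =====

-- The first loop of A, over range(1, n+1): a counts the elements, discount counts multiples of 10.
theorem pv_foldA (m : Nat) :
    (((List.range m).map (fun j : Nat => (1 : Int) + (j : Int)))).foldl
      (fun (st : Int × Int) i => (st.1 + 1, if PySem.Int.mod i 10 = 0 then st.2 + 1 else st.2))
      (0, 0)
    = ((m : Int), ((m / 10 : Nat) : Int)) := by
  induction m with
  | zero => simp
  | succ m ih =>
      rw [List.range_succ, List.map_append, List.foldl_append, ih]
      have hmod : PySem.Int.mod ((1 : Int) + m) 10 = (((m + 1) % 10 : Nat) : Int) := by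
        have := PySem.Int.mod_natCast (m + 1) 10
        rw [← this]; congr 1; push_cast; ring
      have hdiv : ((m + 1) / 10 : Nat) = m / 10 + if (m + 1) % 10 = 0 then 1 else 0 := by
        rw [Nat.succ_div]
        by_cases h : (m + 1) % 10 = 0
        · simp [h, Nat.dvd_of_mod_eq_zero h]
        · have hnd : ¬ 10 ∣ (m + 1) := by omega
          simp [h, hnd]
      simp only [List.map_cons, List.map_nil, List.foldl_cons, List.foldl_nil, hmod]
      rw [hdiv]
      by_cases h : (m + 1) % 10 = 0 <;> simp [h, Prod.ext_iff] <;> omega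

-- The second loop of A: b counts the elements of the list.
theorem pv_foldB (l : List Int) (init : Int) :
    l.foldl (fun (b : Int) _ => b + 1) init = init + l.length := by
  induction l generalizing init with
  | nil => simp
  | cons x xs ih => simp [List.foldl_cons, ih]; ring


-- ===== VERDICT (by name: the statement is the Claim_ definition above) =====
theorem solution_spec : Claim_equal_solution := by
  intro n k _
  unfold Spec_solution solution solution_alt
  rw [PySem.List.pyRange_one (1) (n + 1), PySem.List.pyRange_one (1) (k + 1)]
  have hn : ((n + 1 - 1).toNat : Int) = max n 0 := by omega
  have hk : ((k + 1 - 1).toNat : Int) = max k 0 := by omega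
  rw [pv_foldA, pv_foldB]
  have hfd : PySem.Int.floordiv (max n 0) 10 = (((n + 1 - 1).toNat / 10 : Nat) : Int) := by
    rw [← hn]; exact PySem.Int.floordiv_natCast _ 10
  simp only [List.length_map, List.length_range, hn, hk, hfd]
  ring
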